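-- pv_equiv track=rewrite | github.com/akshatg20/sql-parser | CollapsedTrieIndex.py | index_graduation_year_collapsed
-- ===== SOURCE A (Python) =====
-- def index_graduation_year_collapsed(years_with_ids, gap=0):
--     """
--     Sorts the graduation years and returns two things:
--     1. A list of student IDs sorted by graduation year.
--     2. A list of triples where the first element are unique graduation years and the second, third elements are the start and end index of the corresponding year in the sorted list.
--
--     This method can be used to create an index on graduation year for a list of students.
--
--     :param years_with_ids: List of tuples in the form ( student_id, graduation_year)
--     :return: sorted_ids, year_start_index
--     """
--
--     # Sort the list of tuples based on the graduation year (second element of the tuple)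
--     sorted_years_with_ids = sorted(years_with_ids, key=lambda x: x[1])
--
--     # Extract the sorted IDs
--     sorted_ids = [item[0] for item in sorted_years_with_ids]
--
--     year_start_index = []
--     year_encountered = set()
--
--     for i, (_, year) in enumerate(sorted_years_with_ids):
--         if year not in year_encountered:
--             year_encountered.add(year)
--             # Record the first occurrence of the graduation year as (year, first_index, last_index)
--             year_start_index.append((year, i+gap))
--
--     return sorted_ids, year_start_index
-- ===== SOURCE B (Python) =====
-- def index_graduation_year_collapsed(years_with_ids, gap=0):
--     # Run-based scan: sort by year, then walk the sorted list consuming one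
--     # run of equal years at a time, emitting (year, start_index + gap) per run.
--     sorted_pairs = sorted(years_with_ids, key=lambda x: x[1])
--     sorted_ids = [sid for sid, _ in sorted_pairs]
--     n = len(sorted_pairs)
--     year_start_index = []
--     i = 0
--     while i < n:
--         year = sorted_pairs[i][1]
--         year_start_index.append((year, i + gap))
--         run_len = 1
--         while i + run_len < n and sorted_pairs[i + run_len][1] == year:
--             run_len += 1
--         i += run_len
--     return sorted_ids, year_start_index
-- ===== Notes on version B (the rewrite author's own statement) =====
-- stated objective: alternative
-- what changed: Replaced the seen-years set and enumerate-with-membership-test loop by a run-based scan over the sorted list that consumes each run of equal years and advances the start index by the run length, needing no auxiliary set.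
import Mathlib
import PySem

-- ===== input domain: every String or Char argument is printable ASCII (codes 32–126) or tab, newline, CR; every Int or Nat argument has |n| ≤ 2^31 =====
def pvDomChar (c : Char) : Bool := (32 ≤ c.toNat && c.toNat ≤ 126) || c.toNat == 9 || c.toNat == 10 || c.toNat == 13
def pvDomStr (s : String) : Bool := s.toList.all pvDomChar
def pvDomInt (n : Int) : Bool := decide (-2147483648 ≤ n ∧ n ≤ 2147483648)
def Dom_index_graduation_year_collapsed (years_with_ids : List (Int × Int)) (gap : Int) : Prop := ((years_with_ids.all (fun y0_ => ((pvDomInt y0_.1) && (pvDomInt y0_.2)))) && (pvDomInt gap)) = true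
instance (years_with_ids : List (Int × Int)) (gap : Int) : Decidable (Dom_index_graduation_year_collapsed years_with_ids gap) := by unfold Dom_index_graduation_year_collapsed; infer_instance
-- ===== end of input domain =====

-- B replaces A's seen-years set and per-element membership test with a run-based
-- scan of the sorted list (alternative decomposition, same asymptotic cost).

-- ===== PORT A =====
def index_graduation_year_collapsed (years_with_ids : List (Int × Int)) (gap : Int) : List Int × (List (Int × Int)) :=
  let sorted_years_with_ids := PySem.List.sorted years_with_ids (fun x => x.2) false
  let sorted_ids := sorted_years_with_ids.map (fun item => item.1)
  let st := (PySem.List.enumerate sorted_years_with_ids 0).foldl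
    (fun (st : PySem.Set Int × List (Int × Int)) p =>
      if PySem.Set.contains st.1 p.2.2 then st
      else (PySem.Set.add st.1 p.2.2, st.2 ++ [(p.2.2, p.1 + gap)]))
    (PySem.Set.empty, [])
  (sorted_ids, st.2)

-- ===== PORT B =====
-- B's outer while loop: emit (year, i+gap) for the run starting at i, then skip the run.
def pvRunScan (gap : Int) : List (Int × Int) → Int → List (Int × Int)
  | [], _ => []
  | (_, y) :: rest, i =>
    let run := rest.takeWhile (fun p => p.2 == y)
    (y, i + gap) :: pvRunScan gap (rest.dropWhile (fun p => p.2 == y)) (i + 1 + run.length)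
termination_by l _ => l.length
decreasing_by
  exact Nat.lt_succ_of_le (List.length_dropWhile_le _ _)

def index_graduation_year_collapsed_alt (years_with_ids : List (Int × Int)) (gap : Int) : List Int × (List (Int × Int)) :=
  let sorted_pairs := PySem.List.sorted years_with_ids (fun x => x.2) false
  (sorted_pairs.map (fun p => p.1), pvRunScan gap sorted_pairs 0)

-- ===== PRECONDITION & SPEC =====
def Spec_index_graduation_year_collapsed (years_with_ids : List (Int × Int)) (gap : Int) (out : List Int × (List (Int × Int))) : Prop := out = index_graduation_year_collapsed_alt years_with_ids gap
instance (years_with_ids : List (Int × Int)) (gap : Int) (out : List Int × (List (Int × Int))) : Decidable (Spec_index_graduation_year_collapsed years_with_ids gap out) := by unfold Spec_index_graduation_year_collapsed; infer_instance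

-- ===== CLAIM (what is proved, stated in full; the proofs are below) =====
def Claim_equal_index_graduation_year_collapsed : Prop := ∀ (years_with_ids : List (Int × Int)) (gap : Int), Dom_index_graduation_year_collapsed years_with_ids gap → Spec_index_graduation_year_collapsed years_with_ids gap (index_graduation_year_collapsed years_with_ids gap)

-- ===== LEMMAS AND PROOFS =====

-- A's loop, in recursive form (state: the seen-years set).
def pvLoopA (gap : Int) : List (Int × Int) → Int → PySem.Set Int → List (Int × Int)
  | [], _, _ => []
  | (_, y) :: rest, i, S =>
    if PySem.Set.contains S y then pvLoopA gap rest (i + 1) S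
    else (y, i + gap) :: pvLoopA gap rest (i + 1) (PySem.Set.add S y)

theorem pv_foldl_eq_loopA (gap : Int) (l : List (Int × Int)) :
    ∀ (i : Int) (S : PySem.Set Int) (acc : List (Int × Int)),
    ((PySem.List.enumerate l i).foldl
      (fun (st : PySem.Set Int × List (Int × Int)) p =>
        if PySem.Set.contains st.1 p.2.2 then st
        else (PySem.Set.add st.1 p.2.2, st.2 ++ [(p.2.2, p.1 + gap)]))
      (S, acc)).2 = acc ++ pvLoopA gap l i S := by
  induction l with
  | nil => intro i S acc; simp [PySem.List.enumerate_nil, pvLoopA]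
  | cons hd tl ih =>
    intro i S acc
    rw [PySem.List.enumerate_cons]
    simp only [List.foldl_cons, pvLoopA]
    by_cases h : PySem.Set.contains S hd.2 = true
    · rw [if_pos h, if_pos h]; exact ih (i + 1) S acc
    · rw [if_neg h, if_neg h, ih]; simp

-- skipping a block of already-seen years leaves the output unchanged
theorem pv_loopA_skip (gap : Int) (run : List (Int × Int)) :
    ∀ (l : List (Int × Int)) (i : Int) (S : PySem.Set Int),
    (∀ p ∈ run, PySem.Set.contains S p.2 = true) →
    pvLoopA gap (run ++ l) i S = pvLoopA gap l (i + run.length) S := by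
  induction run with
  | nil => intro l i S _; simp
  | cons hd tl ih =>
    intro l i S h
    have hhd := h hd (by simp)
    obtain ⟨a, y⟩ := hd
    simp only [List.cons_append, pvLoopA, hhd, if_pos]
    rw [ih l (i + 1) S (fun p hp => h p (by simp [hp]))]
    congr 1
    simp [List.length_cons]
    ring

theorem pv_loopA_eq_runScan (gap : Int) :
    ∀ (n : Nat) (l : List (Int × Int)), l.length ≤ n →
    l.Pairwise (fun a b => a.2 ≤ b.2) →
    ∀ (i : Int) (S : PySem.Set Int),
    (∀ y' ∈ S, ∀ p ∈ l, y' < p.2) →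
    pvLoopA gap l i S = pvRunScan gap l i := by
  intro n
  induction n with
  | zero =>
    intro l hl _ i S _
    have : l = [] := List.length_eq_zero_iff.mp (Nat.le_zero.mp hl)
    subst this; simp [pvLoopA, pvRunScan]
  | succ n ih =>
    intro l hl hpw i S hS
    match l with
    | [] => simp [pvLoopA, pvRunScan]
    | (a, y) :: rest =>
      have hy : PySem.Set.contains S y = false := by
        by_contra h
        have hmem : y ∈ S := (PySem.Set.contains_iff S y).mp (by
          revert h; cases PySem.Set.contains S y <;> simp)
        exact absurd (hS y hmem (a, y) (by simp)) (by simp)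
      have hrest : ∀ p ∈ rest, y ≤ p.2 := fun p hp => (List.pairwise_cons.mp hpw).1 p hp
      have hpwrest : rest.Pairwise (fun a b => a.2 ≤ b.2) := (List.pairwise_cons.mp hpw).2
      have hsplit : rest.takeWhile (fun p : Int × Int => p.2 == y)
          ++ rest.dropWhile (fun p : Int × Int => p.2 == y) = rest :=
        List.takeWhile_append_dropWhile
      -- every element of the run has year y, hence is in S.add y
      have hrunmem : ∀ p ∈ rest.takeWhile (fun p : Int × Int => p.2 == y),
          PySem.Set.contains (PySem.Set.add S y) p.2 = true := by
        intro p hp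
        have hpy : p.2 = y := by simpa using List.mem_takeWhile_imp hp
        exact (PySem.Set.contains_iff _ _).mpr (by
          rw [hpy]; exact (PySem.Set.mem_add S y y).mpr (Or.inr rfl))
      have hrstrest : ∀ p ∈ rest.dropWhile (fun p : Int × Int => p.2 == y), p ∈ rest :=
        fun p hp => (List.dropWhile_sublist _).mem hp
      -- every element after the run has year > y
      have hrstgt : ∀ p ∈ rest.dropWhile (fun p : Int × Int => p.2 == y), y < p.2 := by
        cases hdw : rest.dropWhile (fun p : Int × Int => p.2 == y) with
        | nil => intro p hp; simp at hp
        | cons d t =>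
          have hd : (d.2 == y) = false := by
            have h0 := List.head?_dropWhile_not (fun p : Int × Int => p.2 == y) rest
            rw [hdw] at h0; simpa using h0
          have hdy : d.2 ≠ y := by simpa using hd
          have hdmem : d ∈ rest := by
            apply hrstrest; rw [hdw]; simp
          have hdgt : y < d.2 := lt_of_le_of_ne (hrest d hdmem) (Ne.symm hdy)
          have hpwrst : (d :: t).Pairwise (fun a b => a.2 ≤ b.2) := by
            rw [← hdw]; exact (List.Pairwise.sublist (List.dropWhile_sublist _) hpwrest)
          intro p hp
          rcases List.mem_cons.mp hp with rfl | hpt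
          · exact hdgt
          · exact lt_of_lt_of_le hdgt ((List.pairwise_cons.mp hpwrst).1 p hpt)
      have hlen : (rest.dropWhile (fun p : Int × Int => p.2 == y)).length ≤ n := by
        have h1 : (rest.dropWhile (fun p : Int × Int => p.2 == y)).length ≤ rest.length :=
          List.length_dropWhile_le _ _
        have h2 : rest.length + 1 ≤ n + 1 := by simpa using hl
        omega
      have hpwrst : (rest.dropWhile (fun p : Int × Int => p.2 == y)).Pairwise
          (fun a b => a.2 ≤ b.2) := List.Pairwise.sublist (List.dropWhile_sublist _) hpwrest
      have hinv : ∀ y' ∈ PySem.Set.add S y,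
          ∀ p ∈ rest.dropWhile (fun p : Int × Int => p.2 == y), y' < p.2 := by
        intro y' hy' p hp
        rcases (PySem.Set.mem_add S y y').mp hy' with h | rfl
        · exact hS y' h p (List.mem_cons_of_mem _ (hrstrest p hp))
        · exact hrstgt p hp
      calc pvLoopA gap ((a, y) :: rest) i S
          = (y, i + gap) :: pvLoopA gap rest (i + 1) (PySem.Set.add S y) := by
            simp only [pvLoopA]
            rw [if_neg (by
              intro hc
              have hmem : y ∈ S := (PySem.Set.contains_iff S y).mp hc
              have := (PySem.Set.contains_iff S y).mpr hmem
              rw [hy] at this; exact Bool.false_ne_true this)]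
        _ = (y, i + gap) :: pvLoopA gap (rest.dropWhile (fun p : Int × Int => p.2 == y))
              (i + 1 + ((rest.takeWhile (fun p : Int × Int => p.2 == y)).length : Int))
              (PySem.Set.add S y) := by
            conv_lhs => rw [← hsplit]
            rw [pv_loopA_skip gap _ _ (i + 1) _ hrunmem]
        _ = (y, i + gap) :: pvRunScan gap (rest.dropWhile (fun p : Int × Int => p.2 == y))
              (i + 1 + ((rest.takeWhile (fun p : Int × Int => p.2 == y)).length : Int)) := by
            rw [ih _ hlen hpwrst _ _ hinv]
        _ = pvRunScan gap ((a, y) :: rest) i := by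
            conv_rhs => rw [pvRunScan]

theorem index_graduation_year_collapsed_spec : Claim_equal_index_graduation_year_collapsed := by
  intro ys gap _
  unfold Spec_index_graduation_year_collapsed index_graduation_year_collapsed index_graduation_year_collapsed_alt
  simp only []
  refine Prod.ext rfl ?_
  have h1 := pv_foldl_eq_loopA gap (PySem.List.sorted ys (fun x => x.2) false) 0 PySem.Set.empty []
  have h2 := pv_loopA_eq_runScan gap (PySem.List.sorted ys (fun x => x.2) false).length
    (PySem.List.sorted ys (fun x => x.2) false) le_rfl
    (PySem.List.sorted_pairwise ys (fun x => x.2))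
    0 PySem.Set.empty (by intro y' hy'; simp [PySem.Set.empty] at hy')
  exact h1.trans (by rw [List.nil_append, h2])
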